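-- pv_equiv track=rewrite | github.com/FaezehFaez2025/InvertiTune | analyze_dataset_stats.py | clean_malformed_quotes
-- ===== SOURCE A (Python) =====
-- def clean_malformed_quotes(output_str):
--     """Clean malformed quotes in the output string.
--
--     Keep quotes only when:
--     1) [ appears right before "
--     2) , appears right after "
--     3) , (space+,) appears right before "
--     4) ] appears right after "
--
--     Remove all other quotes.
--     """
--     result = []
--     i = 0
--     while i < len(output_str):
--         char = output_str[i]
--
--         if char == '"':
--             # Check if this quote should be kept
--             keep_quote = False
--
--             # Check condition 1: [ appears right before "
--             if i > 0 and output_str[i-1] == '[':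
--                 keep_quote = True
--
--             # Check condition 2: , appears right after "
--             elif i < len(output_str) - 1 and output_str[i+1] == ',':
--                 keep_quote = True
--
--             # Check condition 3: , (space+,) appears right before "
--             elif i > 1 and output_str[i-2:i] == ', ':
--                 keep_quote = True
--
--             # Check condition 4: ] appears right after "
--             elif i < len(output_str) - 1 and output_str[i+1] == ']':
--                 keep_quote = True
--
--             if keep_quote:
--                 result.append(char)
--             # If not keeping the quote, skip it (don't append)
--         else:
--             result.append(char)
--
--         i += 1
--
--     return ''.join(result)
-- ===== SOURCE B (Python) =====
-- def clean_malformed_quotes(output_str):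
--     """Staged split/rejoin: cut the string at every quote, then glue the pieces
--     back, re-inserting a quote at a cut only when the piece to its left ends
--     with '[' or ', ', or the piece to its right starts with ',' or ']'.
--     Correct because A's keep-conditions only read non-quote context characters,
--     which are exactly the edges of the split pieces."""
--     parts = output_str.split('"')
--     pieces = [parts[0]]
--     for left, right in zip(parts, parts[1:]):
--         if left.endswith('[') or left.endswith(', ') or right.startswith((',', ']')):
--             pieces.append('"')
--         pieces.append(right)
--     return ''.join(pieces)
-- ===== Notes on version B (the rewrite author's own statement) =====
-- stated objective: faster
-- what changed: Replaces the per-character index loop with its four-way elif context test by a staged split/rejoin: the string is cut at every quote with str.split and a quote is re-inserted at a cut only when the left piece ends with '[' or ', ' or the right piece starts with ',' or ']'; the per-character work moves into C-level str.split/str.join (constant-factor speedup, measured).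
import Mathlib
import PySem

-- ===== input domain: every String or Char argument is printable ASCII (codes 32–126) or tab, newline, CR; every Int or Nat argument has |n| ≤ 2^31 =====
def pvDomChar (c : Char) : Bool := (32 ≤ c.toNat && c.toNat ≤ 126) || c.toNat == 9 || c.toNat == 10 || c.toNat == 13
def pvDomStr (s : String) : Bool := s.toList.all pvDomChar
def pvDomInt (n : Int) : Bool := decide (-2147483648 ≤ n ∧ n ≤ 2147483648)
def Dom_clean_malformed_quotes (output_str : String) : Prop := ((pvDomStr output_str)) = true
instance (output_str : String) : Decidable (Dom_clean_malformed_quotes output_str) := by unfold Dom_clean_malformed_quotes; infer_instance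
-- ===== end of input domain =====

-- B replaces A's per-character index loop by a staged split on '"' followed by a
-- rejoin that re-inserts a quote only in the four allowed edge contexts; a timing run measured B faster (constant factor).

-- ===== PORT A =====
-- the while loop over i, with the same elif chain; Python string indexing is by
-- code point, so we work on s.toList (exact). 'i + 1 < cs.length' is Python's
-- 'i < len(output_str) - 1' (equivalent for every i the loop reaches).
def cleanALoop (cs : List Char) (i : Nat) (result : List Char) : List Char :=
  if h : i < cs.length then
    let char := cs[i]
    if char = '"' then
      let keep_quote :=
        if 0 < i ∧ PySem.List.pyGet? cs ((i : Int) - 1) = some '[' then true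
        else if i + 1 < cs.length ∧ PySem.List.pyGet? cs ((i : Int) + 1) = some ',' then true
        else if 1 < i ∧ PySem.List.slice cs (some ((i : Int) - 2)) (some (i : Int)) = [',', ' '] then true
        else if i + 1 < cs.length ∧ PySem.List.pyGet? cs ((i : Int) + 1) = some ']' then true
        else false
      if keep_quote then cleanALoop cs (i + 1) (result ++ [char])
      else cleanALoop cs (i + 1) result
    else cleanALoop cs (i + 1) (result ++ [char])
  else result
termination_by cs.length - i

def clean_malformed_quotes (output_str : String) : String :=
  String.ofList (cleanALoop output_str.toList 0 [])

-- ===== PORT B =====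
-- 'left.endswith('[') or left.endswith(', ') or right.startswith((',', ']'))'
def pvKeepB (left right : List Char) : Bool :=
  PySem.Chars.endswith left ['['] || PySem.Chars.endswith left [',', ' '] ||
    (PySem.Chars.startswith right [','] || PySem.Chars.startswith right [']'])

-- the 'for left, right in zip(parts, parts[1:])' loop, appending the kept quote and the piece
def pvRejoin : List Char → List (List Char) → List Char
  | _, [] => []
  | left, right :: rs => (if pvKeepB left right then ['"'] else []) ++ right ++ pvRejoin right rs

-- output_str.split('"') is List.splitOn '"' on the code points (exact for a 1-char separator)
def clean_malformed_quotes_alt (output_str : String) : String :=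
  match output_str.toList.splitOn '"' with
  | [] => ""   -- unreachable: splitOn never returns []
  | p0 :: rest => String.ofList (p0 ++ pvRejoin p0 rest)

-- ===== PRECONDITION & SPEC =====
def Spec_clean_malformed_quotes (output_str : String) (out : String) : Prop := out = clean_malformed_quotes_alt output_str
instance (output_str : String) (out : String) : Decidable (Spec_clean_malformed_quotes output_str out) := by unfold Spec_clean_malformed_quotes; infer_instance

-- ===== CLAIM (what is proved, stated in full; the proofs are below) =====
def Claim_equal_clean_malformed_quotes : Prop := ∀ (output_str : String), Dom_clean_malformed_quotes output_str → Spec_clean_malformed_quotes output_str (clean_malformed_quotes output_str)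

-- ===== LEMMAS AND PROOFS =====

-- canonical per-character form of A: the keep decision from the two previous and the next character
def pvKeep (c : Char) (p1 p2 n : Option Char) : Bool :=
  c ≠ '"' ∨ p1 = some '[' ∨ n = some ',' ∨ (p2 = some ',' ∧ p1 = some ' ') ∨ n = some ']'

def pvGo (p2 p1 : Option Char) : List Char → List Char
  | [] => []
  | c :: rest =>
      (if pvKeep c p1 p2 rest.head? then [c] else []) ++ pvGo p1 (some c) rest

lemma pvGo_nil (p2 p1 : Option Char) : pvGo p2 p1 [] = [] := rfl

lemma pvGo_cons (p2 p1 : Option Char) (c : Char) (rest : List Char) :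
    pvGo p2 p1 (c :: rest) =
      (if pvKeep c p1 p2 rest.head? then [c] else []) ++ pvGo p1 (some c) rest := rfl

-- helpers describing A's view of the two previous characters at index i
def pvPrev1 (cs : List Char) (i : Nat) : Option Char := if i = 0 then none else cs[i-1]?
def pvPrev2 (cs : List Char) (i : Nat) : Option Char := if i ≤ 1 then none else cs[i-2]?

lemma pvSlice_pair (cs : List Char) (i : Nat) (h1 : 1 < i) (h2 : i ≤ cs.length) :
    (PySem.List.slice cs (some ((i : Int) - 2)) (some (i : Int)) = [',', ' '])
      ↔ (cs[i-2]? = some ',' ∧ cs[i-1]? = some ' ') := by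
  have hcast : ((i : Int) - 2) = ((i - 2 : Nat) : Int) := by omega
  rw [hcast, PySem.List.slice_natCast, show i - (i - 2) = 2 by omega]
  have hb2 : i - 2 < cs.length := by omega
  have hb1 : i - 1 < cs.length := by omega
  have hd2 : cs.drop (i-2) = cs[i-2]'hb2 :: cs.drop (i-1) := by
    have hdd := List.drop_eq_getElem_cons hb2
    rwa [show i - 2 + 1 = i - 1 by omega] at hdd
  have hd1 : cs.drop (i-1) = cs[i-1]'hb1 :: cs.drop i := by
    have hdd := List.drop_eq_getElem_cons hb1
    rwa [show i - 1 + 1 = i by omega] at hdd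
  rw [hd2, hd1]
  simp [List.getElem?_eq_getElem hb2, List.getElem?_eq_getElem hb1]

-- A's elif chain equals pvKeep for a quote character at an in-range index
lemma pvChain_eq (cs : List Char) (i : Nat) (h : i < cs.length) (hc : cs[i] = '"') :
    (if 0 < i ∧ PySem.List.pyGet? cs ((i : Int) - 1) = some '[' then true
     else if i + 1 < cs.length ∧ PySem.List.pyGet? cs ((i : Int) + 1) = some ',' then true
     else if 1 < i ∧ PySem.List.slice cs (some ((i : Int) - 2)) (some (i : Int)) = [',', ' '] then true
     else if i + 1 < cs.length ∧ PySem.List.pyGet? cs ((i : Int) + 1) = some ']' then true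
     else false)
    = pvKeep cs[i] (pvPrev1 cs i) (pvPrev2 cs i) cs[i+1]? := by
  have hget1 : ∀ (j : Nat), PySem.List.pyGet? cs ((j : Int)) = cs[j]? := by
    intro j; simp [PySem.List.pyGet?_natCast]
  have hnext : PySem.List.pyGet? cs ((i : Int) + 1) = cs[i+1]? := by
    rw [show ((i : Int) + 1) = ((i + 1 : Nat) : Int) by omega, hget1]
  have hnlen : ∀ (x : Char), (i + 1 < cs.length ∧ cs[i+1]? = some x) ↔ cs[i+1]? = some x := by
    intro x
    constructor
    · exact fun ⟨_, h2⟩ => h2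
    · intro hx
      exact ⟨(List.getElem?_eq_some_iff.mp hx).1, hx⟩
  have hp1 : (0 < i ∧ PySem.List.pyGet? cs ((i : Int) - 1) = some '[') ↔ pvPrev1 cs i = some '[' := by
    unfold pvPrev1
    by_cases h0 : i = 0
    · subst h0; simp [PySem.List.pyGet?]
    · rw [show ((i : Int) - 1) = ((i - 1 : Nat) : Int) by omega, hget1]
      simp [h0, Nat.pos_of_ne_zero h0]
  have hp2 : (1 < i ∧ PySem.List.slice cs (some ((i : Int) - 2)) (some (i : Int)) = [',', ' ']) ↔
      (pvPrev2 cs i = some ',' ∧ pvPrev1 cs i = some ' ') := by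
    unfold pvPrev1 pvPrev2
    by_cases h1 : 1 < i
    · rw [pvSlice_pair cs i h1 (by omega)]
      simp [h1, show ¬ i ≤ 1 by omega, show i ≠ 0 by omega]
    · simp [h1, show i ≤ 1 by omega]
  simp only [hnext, hp1, hnlen, hp2]
  unfold pvKeep
  simp only [hc]
  by_cases A1 : pvPrev1 cs i = some '[' <;>
    by_cases A2 : cs[i+1]? = some ',' <;>
      by_cases A3 : (pvPrev2 cs i = some ',' ∧ pvPrev1 cs i = some ' ') <;>
        by_cases A4 : cs[i+1]? = some ']' <;>
          simp [A1, A2, A3, A4]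

-- A's loop from index i is pvGo on the suffix, with the two previous characters as state
lemma pvLoop_eq_go (cs : List Char) : ∀ (i : Nat) (result : List Char),
    cleanALoop cs i result = result ++ pvGo (pvPrev2 cs i) (pvPrev1 cs i) (cs.drop i) := by
  intro i
  induction' hn : cs.length - i using Nat.strong_induction_on with n ih generalizing i
  intro result
  rw [cleanALoop]
  by_cases h : i < cs.length
  · have hdrop : cs.drop i = cs[i] :: cs.drop (i + 1) := List.drop_eq_getElem_cons h
    have hhead : (cs.drop (i + 1)).head? = cs[i+1]? := by
      rw [List.head?_drop]
    have hrec : ∀ r, cleanALoop cs (i + 1) r = r ++ pvGo (pvPrev2 cs (i+1)) (pvPrev1 cs (i+1)) (cs.drop (i+1)) :=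
      ih (cs.length - (i+1)) (by omega) (i+1) rfl
    have hprev1 : pvPrev1 cs (i + 1) = some cs[i] := by
      unfold pvPrev1; simp [List.getElem?_eq_getElem h]
    have hprev2 : pvPrev2 cs (i + 1) = pvPrev1 cs i := by
      unfold pvPrev1 pvPrev2
      rcases Nat.eq_zero_or_pos i with h0 | h0
      · simp [h0]
      · simp [show ¬ i + 1 ≤ 1 by omega, show i ≠ 0 by omega]
    simp only [h, dif_pos]
    by_cases hq : cs[i] = '"'
    · have hchain := pvChain_eq cs i h hq
      simp only [hq] at hchain
      cases hkb : pvKeep '"' (pvPrev1 cs i) (pvPrev2 cs i) cs[i+1]?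
      · simp only [hq, hchain, hkb, Bool.false_eq_true, if_false]
        rw [hdrop, pvGo_cons, hrec, hhead, hprev2, hprev1]
        simp [hq, hkb]
      · simp only [hq, hchain, hkb, if_true]
        rw [hdrop, pvGo_cons, hrec, hhead, hprev2, hprev1]
        simp [hq, hkb]
    · have hk : pvKeep cs[i] (pvPrev1 cs i) (pvPrev2 cs i) cs[i+1]? = true := by
        unfold pvKeep; simp [hq]
      simp only [if_neg hq]
      rw [hdrop, pvGo_cons, hrec, hhead, hprev2, hprev1]
      simp [hk]
  · simp only [h, dif_neg, not_false_iff]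
    rw [List.drop_eq_nil_of_le (by omega)]
    simp [pvGo_nil]

-- ===== B-side: split/rejoin equals pvGo =====

-- glue: the inverse of splitOn '"' (pieces re-joined with a quote between them)
def pvGlue : List (List Char) → List Char
  | [] => []
  | [r] => r
  | r :: rs => r ++ '"' :: pvGlue rs

lemma pvGlue_cons_cons (r : List Char) (s : List Char) (rs : List (List Char)) :
    pvGlue (r :: s :: rs) = r ++ '"' :: pvGlue (s :: rs) := rfl

lemma pvGlue_cons_head (c : Char) (h : List Char) (t : List (List Char)) :
    pvGlue ((c :: h) :: t) = c :: pvGlue (h :: t) := by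
  cases t with
  | nil => rfl
  | cons s rs => simp [pvGlue_cons_cons]

lemma pvGlue_splitOn (xs : List Char) : pvGlue (xs.splitOn '"') = xs := by
  induction xs with
  | nil => rfl
  | cons c cs ih =>
      by_cases hc : c = '"'
      · subst hc
        rw [List.splitOn, List.splitOnP_cons]
        simp only [beq_self_eq_true, if_true]
        rw [show List.splitOnP (fun x => x == '"') cs = cs.splitOn '"' from rfl]
        obtain ⟨h, t, ht⟩ := List.exists_cons_of_ne_nil (List.splitOnP_ne_nil (fun x => x == '"') cs)
        rw [show List.splitOnP (fun x => x == '"') cs = cs.splitOn '"' from rfl] at ht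
        rw [ht]
        rw [ht] at ih
        simpa [pvGlue_cons_cons] using congrArg (fun l => '"' :: l) ih
      · rw [List.splitOn, List.splitOnP_cons]
        simp only [beq_iff_eq, hc, if_false]
        rw [show List.splitOnP (fun x => x == '"') cs = cs.splitOn '"' from rfl]
        obtain ⟨h, t, ht⟩ := List.exists_cons_of_ne_nil (List.splitOnP_ne_nil (fun x => x == '"') cs)
        rw [show List.splitOnP (fun x => x == '"') cs = cs.splitOn '"' from rfl] at ht
        rw [ht, List.modifyHead_cons, pvGlue_cons_head]
        rw [ht] at ih
        rw [ih]
  -- 'if_neg' above handles (c == '"') = false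

-- every piece of splitOn '"' is quote-free
lemma pvSplitOn_no_quote (xs : List Char) : ∀ s ∈ xs.splitOn '"', '"' ∉ s := by
  induction xs with
  | nil => intro s hs; simp [List.splitOn, List.splitOnP_nil] at hs; simp [hs]
  | cons c cs ih =>
      by_cases hc : c = '"'
      · subst hc
        rw [List.splitOn, List.splitOnP_cons]
        simp only [beq_self_eq_true, if_true]
        intro s hs
        rcases List.mem_cons.mp hs with rfl | hs
        · simp
        · exact ih s hs
      · rw [List.splitOn, List.splitOnP_cons]
        simp only [beq_iff_eq, hc, if_false]
        rw [show List.splitOnP (fun x => x == '"') cs = cs.splitOn '"' from rfl]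
        obtain ⟨h, t, ht⟩ := List.exists_cons_of_ne_nil (List.splitOnP_ne_nil (fun x => x == '"') cs)
        rw [show List.splitOnP (fun x => x == '"') cs = cs.splitOn '"' from rfl] at ht
        rw [ht, List.modifyHead_cons]
        intro s hs
        rcases List.mem_cons.mp hs with rfl | hs
        · intro hm
          rcases List.mem_cons.mp hm with h1 | h1
          · exact hc h1.symm
          · exact ih h (ht ▸ List.mem_cons_self) h1
        · exact ih s (ht ▸ List.mem_cons_of_mem _ hs)

-- the rolling two-character context carried through a segment
def pvCtx (acc : Option Char × Option Char) (seg : List Char) : Option Char × Option Char :=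
  seg.foldl (fun a c => (a.2, some c)) acc

lemma pvCtx_cons (acc : Option Char × Option Char) (c : Char) (cs : List Char) :
    pvCtx acc (c :: cs) = pvCtx (acc.2, some c) cs := rfl

-- a quote-free segment passes through pvGo unchanged, shifting the context
lemma pvGo_append_seg (seg : List Char) : ∀ (tl : List Char) (p2 p1 : Option Char),
    '"' ∉ seg →
    pvGo p2 p1 (seg ++ tl) = seg ++ pvGo (pvCtx (p2, p1) seg).1 (pvCtx (p2, p1) seg).2 tl := by
  induction seg with
  | nil => intro tl p2 p1 _; simp [pvCtx]
  | cons c cs ih =>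
      intro tl p2 p1 hq
      have hc : c ≠ '"' := fun h => hq (h ▸ List.mem_cons_self)
      have hk : pvKeep c p1 p2 ((cs ++ tl).head?) = true := by
        unfold pvKeep; simp [hc]
      rw [List.cons_append, pvGo_cons, hk, pvCtx_cons]
      rw [ih tl p1 (some c) (fun h => hq (List.mem_cons_of_mem _ h))]
      simp

-- the context after a segment, read off the segment's reverse
lemma pvCtx_reverse (seg : List Char) : ∀ (p2 p1 : Option Char),
    pvCtx (p2, p1) seg =
      match seg.reverse with
      | [] => (p2, p1)
      | [a] => (p1, some a)
      | a :: b :: _ => (some b, some a) := by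
  induction seg using List.reverseRecOn with
  | nil => intro p2 p1; simp [pvCtx]
  | append_singleton seg a ih =>
      intro p2 p1
      have : pvCtx (p2, p1) (seg ++ [a]) = ((pvCtx (p2, p1) seg).2, some a) := by
        simp [pvCtx, List.foldl_append]
      rw [this, List.reverse_append]
      cases hrev : seg.reverse with
      | nil => simp [ih, hrev]
      | cons b t =>
          have := ih p2 p1
          rw [hrev] at this
          cases t with
          | nil => simp [this]
          | cons c t' => simp [this]

-- singleton prefix/suffix characterizations
lemma pvPrefix_singleton (x : Char) (l : List Char) : ([x] <+: l) ↔ l.head? = some x := by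
  cases l with
  | nil => simp
  | cons a t => simp [List.cons_prefix_cons, eq_comm]

lemma pvSuffix_singleton (x : Char) (l : List Char) : ([x] <:+ l) ↔ l.reverse.head? = some x := by
  rw [← List.reverse_prefix]
  simp [pvPrefix_singleton]

lemma pvPrefix_pair (x y : Char) (m : List Char) :
    ([x, y] <+: m) ↔ (m.head? = some x ∧ m.tail.head? = some y) := by
  cases m with
  | nil => simp
  | cons a t => simp [List.cons_prefix_cons, pvPrefix_singleton, eq_comm]

lemma pvSuffix_pair (x y : Char) (l : List Char) :
    ([x, y] <:+ l) ↔ (l.reverse.head? = some y ∧ l.reverse.tail.head? = some x) := by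
  rw [← List.reverse_prefix, show ([x, y].reverse = [y, x]) from rfl, pvPrefix_pair]

-- B's keep test agrees with A's context test at a cut (incoming p1 is none or a quote)
lemma pvKeep_eq_keepB (left r : List Char) (rs : List (List Char)) (p2 p1 : Option Char)
    (hp1 : p1 = none ∨ p1 = some '"') :
    pvKeep '"' (pvCtx (p2, p1) left).2 (pvCtx (p2, p1) left).1 ((pvGlue (r :: rs)).head?) =
      pvKeepB left r := by
  have hhead : ∀ (x : Char), x ≠ '"' →
      (((pvGlue (r :: rs)).head? = some x) ↔ r.head? = some x) := by
    intro x hx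
    cases rs with
    | nil => simp [pvGlue]
    | cons s t =>
        rw [pvGlue_cons_cons]
        cases r with
        | nil => simp [Ne.symm hx]
        | cons a t' => simp
  have hc1 : ((pvGlue (r :: rs)).head? = some ',') ↔ r.head? = some ',' :=
    hhead ',' (by decide)
  have hc2 : ((pvGlue (r :: rs)).head? = some ']') ↔ r.head? = some ']' :=
    hhead ']' (by decide)
  have E1 : (PySem.Chars.endswith left ['['] = true) ↔ left.reverse.head? = some '[' :=
    (PySem.Chars.endswith_iff _ _).trans (pvSuffix_singleton _ _)
  have E2 : (PySem.Chars.endswith left [',', ' '] = true) ↔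
      (left.reverse.head? = some ' ' ∧ left.reverse.tail.head? = some ',') :=
    (PySem.Chars.endswith_iff _ _).trans (pvSuffix_pair _ _ _)
  have S1 : (PySem.Chars.startswith r [','] = true) ↔ r.head? = some ',' :=
    (PySem.Chars.startswith_iff _ _).trans (pvPrefix_singleton _ _)
  have S2 : (PySem.Chars.startswith r [']'] = true) ↔ r.head? = some ']' :=
    (PySem.Chars.startswith_iff _ _).trans (pvPrefix_singleton _ _)
  rw [pvCtx_reverse]
  unfold pvKeep pvKeepB
  rw [Bool.eq_iff_iff]
  cases hrev : left.reverse with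
  | nil =>
      rw [hrev] at E1 E2
      simp only [Bool.or_eq_true, decide_eq_true_eq, E1, E2, S1, S2, hc1, hc2]
      rcases hp1 with rfl | rfl <;> simp
  | cons a t =>
      rw [hrev] at E1 E2
      cases t with
      | nil =>
          simp only [Bool.or_eq_true, decide_eq_true_eq, E1, E2, S1, S2, hc1, hc2]
          clear E1 E2 S1 S2 hc1 hc2 hhead
          rcases hp1 with rfl | rfl <;> simp
      | cons b t' =>
          simp only [Bool.or_eq_true, decide_eq_true_eq, E1, E2, S1, S2, hc1, hc2]
          simp
          clear E1 E2 S1 S2 hc1 hc2 hhead hp1 hrev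
          tauto

-- main: pvGo over the glued pieces is the first piece plus the rejoin
lemma pvGo_glue : ∀ (rest : List (List Char)) (left : List Char) (p2 p1 : Option Char),
    (∀ s ∈ left :: rest, '"' ∉ s) → (p1 = none ∨ p1 = some '"') →
    pvGo p2 p1 (pvGlue (left :: rest)) = left ++ pvRejoin left rest := by
  intro rest
  induction rest with
  | nil =>
      intro left p2 p1 hq _
      have hql : '"' ∉ left := hq left List.mem_cons_self
      have h := pvGo_append_seg left [] p2 p1 hql
      rw [pvGo_nil] at h
      simp only [List.append_nil] at h
      rw [show pvGlue [left] = left from rfl, show pvRejoin left [] = [] from rfl,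
        List.append_nil]
      exact h
  | cons r rs ih =>
      intro left p2 p1 hq hp1
      have hql : '"' ∉ left := hq left List.mem_cons_self
      rw [pvGlue_cons_cons, pvGo_append_seg left _ p2 p1 hql, pvGo_cons]
      rw [pvKeep_eq_keepB left r rs p2 p1 hp1]
      have hrec := ih r (pvCtx (p2, p1) left).2 (some '"')
        (fun s hs => hq s (List.mem_cons_of_mem _ hs)) (Or.inr rfl)
      rw [hrec]
      simp [pvRejoin]

-- ===== VERDICT (by name: the statement is the Claim_ definition above) =====
theorem clean_malformed_quotes_spec : Claim_equal_clean_malformed_quotes := by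
  intro s _
  unfold Spec_clean_malformed_quotes clean_malformed_quotes clean_malformed_quotes_alt
  rw [pvLoop_eq_go]
  obtain ⟨p0, rest, hsp⟩ := List.exists_cons_of_ne_nil
    (List.splitOnP_ne_nil (fun x => x == '"') s.toList)
  rw [show List.splitOnP (fun x => x == '"') s.toList = s.toList.splitOn '"' from rfl] at hsp
  rw [hsp]
  have hglue := pvGlue_splitOn s.toList
  rw [hsp] at hglue
  have hnq := pvSplitOn_no_quote s.toList
  rw [hsp] at hnq
  rw [show s.toList.drop 0 = s.toList from rfl,
    show pvPrev1 s.toList 0 = none from rfl, show pvPrev2 s.toList 0 = none from rfl,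
    ← hglue, pvGo_glue rest p0 none none hnq (Or.inl rfl)]
  simp
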